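-- pv_equiv track=rewrite | github.com/Yas-da/IC-stroke | motion_intention_detection.py | extract_predicted_intervals
-- ===== SOURCE A (Python) =====
-- def extract_predicted_intervals(predictions, indices):
--     intervals = []
--     in_interval = False
--     for idx, (frame_idx, pred) in enumerate(zip(indices, predictions)):
--         if pred == 1 and not in_interval:
--             start = frame_idx
--             in_interval = True
--         elif pred == 0 and in_interval:
--             end = frame_idx - 1
--             intervals.append((start, end))
--             in_interval = False
--     if in_interval:
--         intervals.append((start, indices[-1]))
--     return intervals
-- ===== SOURCE B (Python) =====
-- def _runs(pairs):
--     # run-length compress the significant (frame, pred) pairs into (pred, first_frame)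
--     if not pairs:
--         return []
--     f, p = pairs[0]
--     i = 1
--     while i < len(pairs) and pairs[i][1] == p:
--         i += 1
--     return [(p, f)] + _runs(pairs[i:])
--
--
-- def _emit(runs, last):
--     # turn the run list into intervals: a 1-run ends one frame before the next run starts,
--     # or at `last` when it is the final run
--     if not runs:
--         return []
--     p, f = runs[0]
--     if len(runs) == 1:
--         return [(f, last)] if p == 1 else []
--     nxt = runs[1][1]
--     return ([(f, nxt - 1)] if p == 1 else []) + _emit(runs[1:], last)
--
--
-- def extract_predicted_intervals(predictions, indices):
--     sig = [(f, p) for f, p in zip(indices, predictions) if p in (0, 1)]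
--     return _emit(_runs(sig), indices[-1] if indices else 0)
-- ===== Notes on version B (the rewrite author's own statement) =====
-- stated objective: alternative
-- what changed: Replaces A's running in_interval flag machine with a pipeline that filters the zipped (frame, pred) pairs to significant 0/1 predictions, run-length compresses them into (pred, first_frame) runs, and emits an interval per 1-run ending one frame before the next run (or at indices[-1] for a trailing run).
import Mathlib
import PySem

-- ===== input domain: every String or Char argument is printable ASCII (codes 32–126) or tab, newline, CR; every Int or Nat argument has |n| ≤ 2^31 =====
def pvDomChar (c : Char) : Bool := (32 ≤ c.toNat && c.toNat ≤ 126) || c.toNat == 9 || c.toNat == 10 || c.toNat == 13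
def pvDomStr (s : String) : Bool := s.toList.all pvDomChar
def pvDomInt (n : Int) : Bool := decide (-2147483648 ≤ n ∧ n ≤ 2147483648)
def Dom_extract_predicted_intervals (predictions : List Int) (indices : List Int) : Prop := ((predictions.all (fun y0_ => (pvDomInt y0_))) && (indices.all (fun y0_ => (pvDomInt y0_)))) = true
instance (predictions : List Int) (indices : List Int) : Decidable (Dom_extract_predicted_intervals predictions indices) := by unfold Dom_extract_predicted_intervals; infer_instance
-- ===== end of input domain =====

-- B replaces A's running in-interval flag by filter + run-length decomposition (objective: alternative, same cost).

-- ===== PORT A =====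
-- the for-loop over zip(indices, predictions) with state (intervals, in_interval, start);
-- start is initialised to 0 but, as in the Python, only read after it has been set.
def pvLoopA (pairs : List (Int × Int)) (intervals : List (Int × Int)) (in_interval : Bool) (start : Int) :
    List (Int × Int) × Bool × Int :=
  match pairs with
  | [] => (intervals, in_interval, start)
  | (frame, pred) :: rest =>
    if pred = 1 ∧ in_interval = false then
      pvLoopA rest intervals true frame
    else if pred = 0 ∧ in_interval = true then
      pvLoopA rest (intervals ++ [(start, frame - 1)]) false start
    else
      pvLoopA rest intervals in_interval start

-- indices[-1] in the trailing close is only reached when the loop ran, i.e. indices ≠ []; .getD 0 is never used.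
def extract_predicted_intervals (predictions : List Int) (indices : List Int) : List (Int × Int) :=
  let r := pvLoopA (indices.zip predictions) [] false 0
  if r.2.1 then r.1 ++ [(r.2.2, indices.getLast?.getD 0)] else r.1

-- ===== PORT B =====
-- run-length compress the significant (frame, pred) pairs into (pred, first_frame)
def pvRuns (pairs : List (Int × Int)) : List (Int × Int) :=
  match pairs with
  | [] => []
  | (f, p) :: rest => (p, f) :: pvRuns (rest.dropWhile (fun x => x.2 == p))
termination_by pairs.length
decreasing_by
  simpa using Nat.lt_succ_of_le (List.length_dropWhile_le _ _)

-- a 1-run ends one frame before the next run starts, or at `last` when it is the final run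
def pvEmit (runs : List (Int × Int)) (last : Int) : List (Int × Int) :=
  match runs with
  | [] => []
  | (p, f) :: rest =>
    match rest with
    | [] => if p = 1 then [(f, last)] else []
    | (_, g) :: _ => (if p = 1 then [(f, g - 1)] else []) ++ pvEmit rest last

def extract_predicted_intervals_alt (predictions : List Int) (indices : List Int) : List (Int × Int) :=
  let sig := (indices.zip predictions).filter (fun fp => fp.2 == 0 || fp.2 == 1)
  pvEmit (pvRuns sig) (indices.getLast?.getD 0)

-- ===== PRECONDITION & SPEC =====
def Spec_extract_predicted_intervals (predictions : List Int) (indices : List Int) (out : List (Int × Int)) : Prop := out = extract_predicted_intervals_alt predictions indices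
instance (predictions : List Int) (indices : List Int) (out : List (Int × Int)) : Decidable (Spec_extract_predicted_intervals predictions indices out) := by unfold Spec_extract_predicted_intervals; infer_instance

-- ===== CLAIM (what is proved, stated in full; the proofs are below) =====
def Claim_equal_extract_predicted_intervals : Prop := ∀ (predictions : List Int) (indices : List Int), Dom_extract_predicted_intervals predictions indices → Spec_extract_predicted_intervals predictions indices (extract_predicted_intervals predictions indices)

-- ===== LEMMAS AND PROOFS =====

-- finishing step of A: close a still-open interval at `last`
def pvFin (r : List (Int × Int) × Bool × Int) (last : Int) : List (Int × Int) :=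
  if r.2.1 then r.1 ++ [(r.2.2, last)] else r.1

-- the accumulator is only appended to
theorem pvLoopA_acc (pairs : List (Int × Int)) (acc : List (Int × Int)) (flag : Bool) (s : Int) :
    pvLoopA pairs acc flag s =
      (acc ++ (pvLoopA pairs [] flag s).1, (pvLoopA pairs [] flag s).2) := by
  induction pairs generalizing acc flag s with
  | nil => simp [pvLoopA]
  | cons hd tl ih =>
    obtain ⟨frame, pred⟩ := hd
    simp only [pvLoopA]
    split_ifs with h1 h2
    · exact ih acc true frame
    · rw [ih (acc ++ [(s, frame - 1)]) false s, ih ([] ++ [(s, frame - 1)]) false s]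
      simp
    · exact ih acc flag s

-- entries the loop ignores (pred ∉ {0,1} in either state) can be filtered away first
theorem pvLoopA_filter (pairs : List (Int × Int)) (acc : List (Int × Int)) (flag : Bool) (s : Int) :
    pvLoopA pairs acc flag s =
      pvLoopA (pairs.filter (fun fp => fp.2 == 0 || fp.2 == 1)) acc flag s := by
  induction pairs generalizing acc flag s with
  | nil => rfl
  | cons hd tl ih =>
    obtain ⟨frame, pred⟩ := hd
    by_cases h0 : pred = 0
    · subst h0
      cases flag <;> simp [pvLoopA, ih]
    · by_cases h1 : pred = 1
      · subst h1
        cases flag <;> simp [pvLoopA, ih]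
      · have : ¬ (pred = 1 ∧ flag = false) := by tauto
        have h2 : ¬ (pred = 0 ∧ flag = true) := by tauto
        simp [pvLoopA, h0, h1, ih]

-- a leading run with pred ≠ 1 emits nothing
theorem pvEmit_cons_not_one (p f : Int) (runs : List (Int × Int)) (last : Int) (hp : p ≠ 1) :
    pvEmit ((p, f) :: runs) last = pvEmit runs last := by
  cases runs with
  | nil => simp [pvEmit, hp]
  | cons hd tl => obtain ⟨q, g⟩ := hd; simp [pvEmit, hp]

-- dropping a leading block of 0-predictions does not change the emitted intervals
theorem pvEmit_runs_dropWhile_zero (l : List (Int × Int)) (last : Int) :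
    pvEmit (pvRuns (l.dropWhile (fun x => x.2 == (0 : Int)))) last = pvEmit (pvRuns l) last := by
  cases l with
  | nil => rfl
  | cons hd tl =>
    obtain ⟨f, p⟩ := hd
    by_cases hp : p = 0
    · subst hp
      rw [show pvRuns ((f, (0:Int)) :: tl) = ((0 : Int), f) :: pvRuns (tl.dropWhile (fun x => x.2 == (0:Int))) from by
            simp [pvRuns]]
      rw [pvEmit_cons_not_one _ _ _ _ (by norm_num)]
      simp [List.dropWhile]
    · have hne : (p == (0 : Int)) = false := by simpa using hp
      simp [List.dropWhile, hne]

-- main invariant: on a list of significant pairs, finishing A's loop from the closed state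
-- yields B's emit-of-runs, and from the open state (started at s') the same with the open run prepended
theorem pvMain (g : List (Int × Int)) (hg : ∀ x ∈ g, x.2 = 0 ∨ x.2 = 1) (last : Int) :
    (∀ s, pvFin (pvLoopA g [] false s) last = pvEmit (pvRuns g) last) ∧
    (∀ s', pvFin (pvLoopA g [] true s') last =
      pvEmit (((1 : Int), s') :: pvRuns (g.dropWhile (fun x => x.2 == (1 : Int)))) last) := by
  induction g with
  | nil =>
    constructor
    · intro s; simp [pvLoopA, pvFin, pvRuns, pvEmit]
    · intro s'; simp [pvLoopA, pvFin, pvRuns, pvEmit]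
  | cons hd tl ih =>
    obtain ⟨f, p⟩ := hd
    have hp : p = 0 ∨ p = 1 := hg (f, p) (by simp)
    have htl : ∀ x ∈ tl, x.2 = 0 ∨ x.2 = 1 := fun x hx => hg x (by simp [hx])
    obtain ⟨ihC, ihO⟩ := ih htl
    constructor
    · intro s
      rcases hp with hp | hp
      · subst hp
        have : pvLoopA (((f, (0:Int))) :: tl) [] false s = pvLoopA tl [] false s := by
          simp [pvLoopA]
        rw [this, ihC s]
        rw [show pvRuns ((f, (0:Int)) :: tl) = ((0:Int), f) :: pvRuns (tl.dropWhile (fun x => x.2 == (0:Int))) from by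
              simp [pvRuns]]
        rw [pvEmit_cons_not_one _ _ _ _ (by norm_num), pvEmit_runs_dropWhile_zero]
      · subst hp
        have : pvLoopA (((f, (1:Int))) :: tl) [] false s = pvLoopA tl [] true f := by
          simp [pvLoopA]
        rw [this, ihO f]
        rw [show pvRuns ((f, (1:Int)) :: tl) = ((1:Int), f) :: pvRuns (tl.dropWhile (fun x => x.2 == (1:Int))) from by
              simp [pvRuns]]
    · intro s'
      rcases hp with hp | hp
      · subst hp
        have hstep : pvLoopA (((f, (0:Int))) :: tl) [] true s' = pvLoopA tl [(s', f - 1)] false s' := by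
          simp [pvLoopA]
        rw [hstep, pvLoopA_acc tl [(s', f - 1)]]
        have hfin : pvFin ([(s', f - 1)] ++ (pvLoopA tl [] false s').1, (pvLoopA tl [] false s').2) last
            = (s', f - 1) :: pvFin (pvLoopA tl [] false s') last := by
          unfold pvFin
          by_cases hb : (pvLoopA tl [] false s').2.1 = true <;> simp [hb]
        rw [hfin, ihC s']
        have hd1 : ((f, (0:Int)) :: tl).dropWhile (fun x => x.2 == (1 : Int)) = (f, (0:Int)) :: tl := by
          simp [List.dropWhile]
        rw [hd1]
        rw [show pvRuns ((f, (0:Int)) :: tl) = ((0:Int), f) :: pvRuns (tl.dropWhile (fun x => x.2 == (0:Int))) from by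
              simp [pvRuns]]
        rw [show pvEmit (((1:Int), s') :: ((0:Int), f) :: pvRuns (tl.dropWhile (fun x => x.2 == (0:Int)))) last
              = (s', f - 1) :: pvEmit (((0:Int), f) :: pvRuns (tl.dropWhile (fun x => x.2 == (0:Int)))) last from by
              simp [pvEmit]]
        rw [pvEmit_cons_not_one _ _ _ _ (by norm_num), pvEmit_runs_dropWhile_zero]
      · subst hp
        have hstep : pvLoopA (((f, (1:Int))) :: tl) [] true s' = pvLoopA tl [] true s' := by
          simp [pvLoopA]
        rw [hstep, ihO s']
        simp [List.dropWhile]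

-- ===== VERDICT (by name: the statement is the Claim_ definition above) =====
theorem extract_predicted_intervals_spec : Claim_equal_extract_predicted_intervals := by
  intro predictions indices _
  unfold Spec_extract_predicted_intervals extract_predicted_intervals extract_predicted_intervals_alt
  have hfilter := pvLoopA_filter (indices.zip predictions) [] false 0
  have hmain := (pvMain ((indices.zip predictions).filter (fun fp => fp.2 == 0 || fp.2 == 1))
      (by intro x hx; have h := List.of_mem_filter hx; simpa using h)
      (indices.getLast?.getD 0)).1 0
  calc (let r := pvLoopA (indices.zip predictions) [] false 0;
        if r.2.1 then r.1 ++ [(r.2.2, indices.getLast?.getD 0)] else r.1)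
      = pvFin (pvLoopA (indices.zip predictions) [] false 0) (indices.getLast?.getD 0) := rfl
    _ = pvFin (pvLoopA ((indices.zip predictions).filter (fun fp => fp.2 == 0 || fp.2 == 1)) [] false 0) (indices.getLast?.getD 0) := by rw [hfilter]
    _ = pvEmit (pvRuns ((indices.zip predictions).filter (fun fp => fp.2 == 0 || fp.2 == 1))) (indices.getLast?.getD 0) := hmain
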